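-- pv_equiv track=rewrite | github.com/omegaXiv-labs/omegaXiv-run-1ef61661-324f-4455-8e8e-7cef134ebbbc | code/core.py | feasible_changepoints
-- ===== SOURCE A (Python) =====
-- from itertools import combinations
--
-- def feasible_changepoints(n_obs: int, l_min: int, step: int = 26, max_breaks: int = 2) -> list[tuple[int, ...]]:
--     grid = list(range(l_min, n_obs - l_min + 1, step))
--     feasible: list[tuple[int, ...]] = [tuple()]
--     for m in range(1, max_breaks + 1):
--         for cp in combinations(grid, m):
--             bounds = (0,) + cp + (n_obs,)
--             if all((bounds[i + 1] - bounds[i]) >= l_min for i in range(len(bounds) - 1)):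
--                 feasible.append(cp)
--     return feasible
-- ===== SOURCE B (Python) =====
-- def feasible_changepoints(n_obs: int, l_min: int, step: int = 26, max_breaks: int = 2) -> list[tuple[int, ...]]:
--     # Level-by-level pruned extension: only gap-feasible prefixes are ever extended,
--     # instead of enumerating and filtering all C(len(grid), m) combinations.
--     grid = list(range(l_min, n_obs - l_min + 1, step))
--     feasible: list[tuple[int, ...]] = [tuple()]
--     # a node is (prev, cp, rest): last bound so far, the prefix tuple, grid elements still usable
--     level = [(0, tuple(), grid)]
--     for _ in range(max_breaks):
--         nxt = []
--         for prev, cp, rest in level: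
--             for j, g in enumerate(rest):
--                 if g - prev >= l_min:
--                     new = cp + (g,)
--                     if n_obs - g >= l_min:
--                         feasible.append(new)
--                     nxt.append((g, new, rest[j + 1:]))
--         level = nxt
--     return feasible
-- ===== Notes on version B (the rewrite author's own statement) =====
-- stated objective: faster
-- what changed: Instead of enumerating every m-combination of the grid and filtering each against all gap constraints, B grows feasible prefixes level by level, extending only prefixes whose gaps already satisfy l_min, so infeasible combinations are pruned before they are generated; Pre_ excludes only step == 0, where range() raises ValueError in both A and B.
import Mathlib
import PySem

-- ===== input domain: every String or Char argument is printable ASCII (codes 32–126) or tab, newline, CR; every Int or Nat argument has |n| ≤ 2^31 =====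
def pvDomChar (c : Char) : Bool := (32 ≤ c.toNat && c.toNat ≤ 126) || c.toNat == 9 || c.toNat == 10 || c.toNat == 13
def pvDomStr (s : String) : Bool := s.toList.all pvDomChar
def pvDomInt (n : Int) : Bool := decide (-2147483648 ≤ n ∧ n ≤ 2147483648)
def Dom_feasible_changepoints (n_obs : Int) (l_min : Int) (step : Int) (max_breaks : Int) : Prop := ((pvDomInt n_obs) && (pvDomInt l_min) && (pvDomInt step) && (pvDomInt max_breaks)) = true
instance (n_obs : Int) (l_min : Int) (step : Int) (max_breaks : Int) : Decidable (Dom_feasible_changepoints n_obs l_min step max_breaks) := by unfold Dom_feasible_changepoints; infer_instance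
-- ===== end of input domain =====

-- B replaces A's generate-all-combinations-then-filter by pruned level-by-level extension of
-- feasible prefixes (faster: infeasible combinations are never generated).

-- ===== PORT A =====
-- itertools.combinations(xs, k) in its lexicographic emission order
def pyCombos : List Int → Nat → List (List Int)
  | _, 0 => [[]]
  | [], _+1 => []
  | x :: xs, k+1 => ((pyCombos xs k).map (fun c => x :: c)) ++ pyCombos xs (k+1)

-- all((bounds[i+1] - bounds[i]) >= l_min for i in range(len(bounds)-1)); indices are in range, so getD is exact
def gapsOkA (l_min : Int) (bounds : List Int) : Bool :=
  (List.range (bounds.length - 1)).all (fun i => decide (bounds.getD (i+1) 0 - bounds.getD i 0 ≥ l_min))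

def feasible_changepoints (n_obs : Int) (l_min : Int) (step : Int) (max_breaks : Int) : List (List Int) :=
  let grid := PySem.List.pyRange l_min (n_obs - l_min + 1) step
  (PySem.List.pyRange 1 (max_breaks + 1) 1).foldl
    (fun feasible m =>
      (pyCombos grid m.toNat).foldl
        (fun feasible cp =>
          if gapsOkA l_min ((0 :: cp) ++ [n_obs]) then feasible ++ [cp] else feasible)
        feasible)
    [[]]

-- ===== PORT B =====
-- inner loop 'for j, g in enumerate(rest)': emitted feasible tuples and next-level nodes of one node
def extendOne (n_obs l_min prev : Int) (cp : List Int) :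
    List Int → List (List Int) × List (Int × List Int × List Int)
  | [] => ([], [])
  | g :: rest =>
    let t := extendOne n_obs l_min prev cp rest
    if g - prev ≥ l_min then
      ((if n_obs - g ≥ l_min then (cp ++ [g]) :: t.1 else t.1),
       (g, cp ++ [g], rest) :: t.2)
    else t

-- 'for prev, cp, rest in level'
def levelStep (n_obs l_min : Int) :
    List (Int × List Int × List Int) → List (List Int) × List (Int × List Int × List Int)
  | [] => ([], [])
  | (prev, cp, rest) :: lvl =>
    let h := extendOne n_obs l_min prev cp rest
    let t := levelStep n_obs l_min lvl
    (h.1 ++ t.1, h.2 ++ t.2)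

def feasible_changepoints_alt (n_obs : Int) (l_min : Int) (step : Int) (max_breaks : Int) : List (List Int) :=
  let grid := PySem.List.pyRange l_min (n_obs - l_min + 1) step
  let res := (List.range max_breaks.toNat).foldl
    (fun st _ =>
      let p := levelStep n_obs l_min st.2
      (st.1 ++ p.1, p.2))
    (([[]] : List (List Int)), [((0 : Int), ([] : List Int), grid)])
  res.1

-- ===== PRECONDITION & SPEC =====
-- Pre_ excludes exactly step = 0, on which Python's range raises ValueError (in A and in B alike).
def Pre_feasible_changepoints (n_obs : Int) (l_min : Int) (step : Int) (max_breaks : Int) : Prop :=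
  step ≠ 0
instance (n_obs : Int) (l_min : Int) (step : Int) (max_breaks : Int) : Decidable (Pre_feasible_changepoints n_obs l_min step max_breaks) := by unfold Pre_feasible_changepoints; infer_instance

def pvWitness_feasible_changepoints : Int × Int × Int × Int := (12, 3, 2, 2)

def Spec_feasible_changepoints (n_obs : Int) (l_min : Int) (step : Int) (max_breaks : Int) (out : List (List Int)) : Prop := out = feasible_changepoints_alt n_obs l_min step max_breaks
instance (n_obs : Int) (l_min : Int) (step : Int) (max_breaks : Int) (out : List (List Int)) : Decidable (Spec_feasible_changepoints n_obs l_min step max_breaks out) := by unfold Spec_feasible_changepoints; infer_instance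

-- ===== CLAIM (what is proved, stated in full; the proofs are below) =====
def Claim_equal_feasible_changepoints : Prop := ∀ (n_obs : Int) (l_min : Int) (step : Int) (max_breaks : Int), Dom_feasible_changepoints n_obs l_min step max_breaks → Pre_feasible_changepoints n_obs l_min step max_breaks → Spec_feasible_changepoints n_obs l_min step max_breaks (feasible_changepoints n_obs l_min step max_breaks)

-- ===== LEMMAS AND PROOFS =====

-- chain form of A's bounds check
def chainOk (lm : Int) : Int → List Int → Bool
  | _, [] => true
  | prev, b :: rest => decide (b - prev ≥ lm) && chainOk lm b rest

theorem gapsOkA_eq_chainOk (lm prev : Int) (rest : List Int) :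
    gapsOkA lm (prev :: rest) = chainOk lm prev rest := by
  induction rest generalizing prev with
  | nil => simp [gapsOkA, chainOk]
  | cons b rest ih =>
    rw [show chainOk lm prev (b :: rest) = (decide (b - prev ≥ lm) && chainOk lm b rest) from rfl,
        ← ih b]
    simp only [gapsOkA, List.length_cons]
    simp [List.range_succ_eq_map, List.all_map, Function.comp_def]
    rfl

-- the gap-ok k-element extensions of node (prev, cp, rest), as next-level nodes, in B's order
def nodesA (lm : Int) : Int → List Int → List Int → Nat → List (Int × List Int × List Int)
  | prev, cp, rest, 0 => [(prev, cp, rest)]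
  | _, _, [], _+1 => []
  | prev, cp, g :: rest, k+1 =>
    (if g - prev ≥ lm then nodesA lm g (cp ++ [g]) rest k else []) ++ nodesA lm prev cp rest (k+1)

-- the fully feasible k-element extensions (final gap to n_obs included), in emission order
def emitA (lm no : Int) : Int → List Int → List Int → Nat → List (List Int)
  | prev, cp, _, 0 => if no - prev ≥ lm then [cp] else []
  | _, _, [], _+1 => []
  | prev, cp, g :: rest, k+1 =>
    (if g - prev ≥ lm then emitA lm no g (cp ++ [g]) rest k else []) ++ emitA lm no prev cp rest (k+1)

theorem extendOne_eq (no lm prev : Int) (cp : List Int) (rest : List Int) :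
    extendOne no lm prev cp rest = (emitA lm no prev cp rest 1, nodesA lm prev cp rest 1) := by
  induction rest with
  | nil => simp [extendOne, emitA, nodesA]
  | cons g rest ih =>
    simp only [extendOne, ih, emitA, nodesA]
    by_cases h1 : g - prev ≥ lm
    · by_cases h2 : no - g ≥ lm <;> simp [h1, h2]
    · simp [h1]

theorem levelStep_append (no lm : Int) (l1 l2 : List (Int × List Int × List Int)) :
    levelStep no lm (l1 ++ l2) =
      ((levelStep no lm l1).1 ++ (levelStep no lm l2).1,
       (levelStep no lm l1).2 ++ (levelStep no lm l2).2) := by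
  induction l1 with
  | nil => simp [levelStep]
  | cons x l1 ih => obtain ⟨p, c, r⟩ := x; simp [levelStep, ih]

theorem levelStep_nodesA (no lm prev : Int) (cp : List Int) (rest : List Int) (k : Nat) :
    levelStep no lm (nodesA lm prev cp rest k) =
      (emitA lm no prev cp rest (k+1), nodesA lm prev cp rest (k+1)) := by
  induction rest generalizing prev cp k with
  | nil =>
    cases k with
    | zero => simp [nodesA, levelStep, extendOne_eq, emitA]
    | succ k => simp [nodesA, levelStep, emitA]
  | cons g rest ih =>
    cases k with
    | zero =>
      simp only [nodesA, levelStep, extendOne_eq]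
      simp
    | succ k =>
      simp only [nodesA]
      rw [levelStep_append]
      by_cases h : g - prev ≥ lm
      · simp only [h, if_pos, ih]
        simp [emitA, h]
      · simp only [h, if_neg, not_false_iff]
        simp [levelStep, ih, emitA, h]

-- B's iteration as a standalone emission stream
def iterB (no lm : Int) : Nat → List (Int × List Int × List Int) → List (List Int)
  | 0, _ => []
  | t+1, lvl => (levelStep no lm lvl).1 ++ iterB no lm t (levelStep no lm lvl).2

theorem foldB_eq_iterB (no lm : Int) (l : List Nat) (acc : List (List Int))
    (lvl : List (Int × List Int × List Int)) :
    (l.foldl (fun st (_ : Nat) =>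
        let p := levelStep no lm st.2
        (st.1 ++ p.1, p.2)) (acc, lvl)).1 = acc ++ iterB no lm l.length lvl := by
  induction l generalizing acc lvl with
  | nil => simp [iterB]
  | cons x l ih => simp [List.foldl_cons, ih, iterB, List.append_assoc]

theorem iterB_nodesA (no lm prev : Int) (cp : List Int) (rest : List Int) (t k : Nat) :
    iterB no lm t (nodesA lm prev cp rest k) =
      ((List.range t).map (fun i => emitA lm no prev cp rest (k + 1 + i))).flatten := by
  induction t generalizing k with
  | zero => simp [iterB]
  | succ t ih =>
    rw [iterB, levelStep_nodesA]
    simp only [ih (k+1)]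
    rw [List.range_succ_eq_map]
    simp only [List.map_cons, List.map_map, List.flatten_cons, Function.comp_def, Nat.add_zero]
    congr 1
    apply congrArg
    apply List.map_congr_left; intro i _; congr 1; omega

-- A's filtered combination list equals emitA with an empty prefix
theorem emitA_eq_filter (lm no prev : Int) (cp rest : List Int) (k : Nat) :
    emitA lm no prev cp rest k =
      ((pyCombos rest k).filter (fun e => chainOk lm prev (e ++ [no]))).map (fun e => cp ++ e) := by
  induction rest generalizing prev cp k with
  | nil =>
    cases k with
    | zero => by_cases h : no - prev ≥ lm <;> simp [emitA, pyCombos, chainOk, h]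
    | succ k => simp [emitA, pyCombos]
  | cons g rest ih =>
    cases k with
    | zero => by_cases h : no - prev ≥ lm <;> simp [emitA, pyCombos, chainOk, h]
    | succ k =>
      simp only [emitA, pyCombos, List.filter_append, List.map_append, List.filter_map]
      by_cases h : g - prev ≥ lm
      · simp only [h, if_pos, ih]
        congr 1
        simp only [List.map_map]
        have : ∀ e : List Int, chainOk lm prev ((g :: e) ++ [no]) = chainOk lm g (e ++ [no]) := by
          intro e; simp [chainOk, h]
        simp only [Function.comp_def, this]
        apply List.map_congr_left; intro e _; simp
      · simp only [h, if_neg, not_false_iff, ih]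
        have hz : List.filter ((fun e => chainOk lm prev (e ++ [no])) ∘ fun c => g :: c)
            (pyCombos rest k) = [] := by
          rw [List.filter_eq_nil_iff]
          intro a _
          simp [Function.comp, chainOk, h]
        rw [hz]
        simp

theorem foldA_filter (lm no : Int) (xs : List (List Int)) (acc : List (List Int)) :
    xs.foldl (fun feasible cp =>
        if gapsOkA lm (0 :: (cp ++ [no])) then feasible ++ [cp] else feasible) acc =
      acc ++ xs.filter (fun cp => chainOk lm 0 (cp ++ [no])) := by
  induction xs generalizing acc with
  | nil => simp
  | cons x xs ih =>
    rw [List.foldl_cons, List.filter_cons]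
    rw [show gapsOkA lm (0 :: (x ++ [no])) = chainOk lm 0 (x ++ [no]) from
      gapsOkA_eq_chainOk lm 0 (x ++ [no])]
    by_cases h : chainOk lm 0 (x ++ [no]) = true
    · rw [if_pos h, if_pos h, ih]; simp [List.append_assoc]
    · rw [if_neg h, if_neg h, ih]

theorem foldA_ms (lm no : Int) (grid : List Int) (ms : List Int) (acc : List (List Int)) :
    ms.foldl (fun feasible m =>
      (pyCombos grid m.toNat).foldl
        (fun feasible cp =>
          if gapsOkA lm (0 :: (cp ++ [no])) then feasible ++ [cp] else feasible)
        feasible) acc =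
      acc ++ (ms.map (fun m => (pyCombos grid m.toNat).filter
                (fun cp => chainOk lm 0 (cp ++ [no])))).flatten := by
  induction ms generalizing acc with
  | nil => simp
  | cons m ms ih =>
    rw [List.foldl_cons, List.map_cons, List.flatten_cons, foldA_filter, ih, List.append_assoc]

theorem range_map_toNat (t : Nat) :
    PySem.List.pyRange 1 ((t : Int) + 1) 1 = (List.range t).map (fun k : Nat => (1 : Int) + (k : Int)) := by
  rw [PySem.List.pyRange_one]
  have h : ((t : Int) + 1 - 1) = (t : Int) := by omega
  rw [h, Int.toNat_natCast]

-- ===== VERDICT (by name: the statement is the Claim_ definition above) =====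
theorem feasible_changepoints_spec : Claim_equal_feasible_changepoints := by
  intro no lm st mb _ _
  show feasible_changepoints no lm st mb = feasible_changepoints_alt no lm st mb
  unfold feasible_changepoints feasible_changepoints_alt
  set grid := PySem.List.pyRange lm (no - lm + 1) st with hg
  simp only
  rw [foldB_eq_iterB, List.length_range]
  have hb : [((0 : Int), ([] : List Int), grid)] = nodesA lm 0 [] grid 0 := by simp [nodesA]
  rw [hb, iterB_nodesA]
  have hmb : mb + 1 = (mb.toNat : Int) + 1 ∨ mb.toNat = 0 ∧ mb + 1 ≤ 1 := by omega
  rcases hmb with h | ⟨h0, h1⟩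
  · rw [h, range_map_toNat]
    simp only [List.cons_append]
    refine Eq.trans (foldA_ms lm no grid (List.map (fun k : Nat => (1 : Int) + (k : Int)) (List.range mb.toNat)) [[]]) ?_
    simp only [List.singleton_append, List.nil_append]
    congr 1
    refine congrArg List.flatten ?_
    simp only [List.map_map, Function.comp_def]
    apply List.map_congr_left; intro i _
    have h1 : ((1 : Int) + (i : Int)).toNat = i + 1 := by omega
    rw [h1]
    have h2 : (0:Nat) + 1 + i = i + 1 := by omega
    rw [h2, emitA_eq_filter]
    simp
  · rw [PySem.List.pyRange_one_eq_nil h1, h0]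
    simp
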